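-- pv_equiv track=rewrite | github.com/gribskov/biocomputing | cluster/tree_multi.py | split_newick
-- ===== SOURCE A (Python) =====
-- def split_newick(newick):
--     """-----------------------------------------------------------------------------------------
--     Split a newick string into its child nodes
--
--     :param newick: string
--     :return: list of newick substrings (child nodes of tree)
--     -----------------------------------------------------------------------------------------"""
--     # remove outer parentheses
--     newick = newick.strip(' ;')
--     if newick.startswith('('):
--         newick = newick[1:-1]
--
--     subtree = []
--     comma = []
--
--     depth = 0
--     pos = 0
--     for c in newick:
--         if c == '(':
--             depth += 1
--         elif c == ')':
--             depth -= 1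
--         elif c == ',':
--             if depth == 0:
--                 comma.append(pos)
--         pos += 1
--
--     if comma:
--         begin = 0
--         for c in comma:
--             subtree.append(newick[begin:c])
--             begin = c + 1
--         subtree.append(newick[begin:])
--
--     return subtree
-- ===== SOURCE B (Python) =====
-- def split_newick(newick):
--     """Split a newick string into its child nodes (single pass with a chunk buffer)."""
--     newick = newick.strip(' ;')
--     if newick.startswith('('):
--         newick = newick[1:-1]
--
--     parts = []
--     buf = []
--     depth = 0
--     for c in newick:
--         if c == ',' and depth == 0:
--             parts.append(''.join(buf))
--             buf = []
--             continue
--         if c == '(':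
--             depth += 1
--         elif c == ')':
--             depth -= 1
--         buf.append(c)
--
--     if not parts:
--         return []
--     parts.append(''.join(buf))
--     return parts
-- ===== Notes on version B (the rewrite author's own statement) =====
-- stated objective: simpler
-- what changed: Replaced A's two-phase build-comma-index-list-then-slice structure with a single pass that accumulates the current chunk in a buffer and emits it at each top-level comma, eliminating the index list and all slicing.
import Mathlib
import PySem

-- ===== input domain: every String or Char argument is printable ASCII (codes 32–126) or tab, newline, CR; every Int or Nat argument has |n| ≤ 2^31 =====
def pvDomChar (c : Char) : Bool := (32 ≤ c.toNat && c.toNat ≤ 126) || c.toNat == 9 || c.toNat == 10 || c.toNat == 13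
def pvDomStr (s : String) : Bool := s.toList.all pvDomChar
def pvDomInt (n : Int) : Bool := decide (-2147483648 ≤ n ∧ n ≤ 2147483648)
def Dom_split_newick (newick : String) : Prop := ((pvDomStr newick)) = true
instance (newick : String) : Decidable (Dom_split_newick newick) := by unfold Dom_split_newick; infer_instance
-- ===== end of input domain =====

-- B replaces A's two passes (collect top-level comma positions, then slice between them) by a
-- single pass that buffers the current chunk and flushes it at each top-level comma (simpler).

-- ===== PORT A =====
def split_newick (newick : String) : List String :=
  let s := PySem.Str.stripChars newick " ;"
  let s := if PySem.Str.startswith s "(" then PySem.Str.slice s (some 1) (some (-1)) else s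
  let r := s.toList.foldl (fun (st : List Int × Int × Int) c =>
      if c = '(' then (st.1, st.2.1 + 1, st.2.2 + 1)
      else if c = ')' then (st.1, st.2.1 - 1, st.2.2 + 1)
      else if c = ',' then
        (if st.2.1 = 0 then (st.1 ++ [st.2.2], st.2.1, st.2.2 + 1) else (st.1, st.2.1, st.2.2 + 1))
      else (st.1, st.2.1, st.2.2 + 1)) ([], 0, 0)
  let comma := r.1
  if comma ≠ [] then
    let b := comma.foldl (fun (st : List String × Int) c =>
        (st.1 ++ [PySem.Str.slice s (some st.2) (some c)], c + 1)) ([], 0)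
    b.1 ++ [PySem.Str.slice s (some b.2) none]
  else []

-- ===== PORT B =====
def split_newick_alt (newick : String) : List String :=
  let s := PySem.Str.stripChars newick " ;"
  let s := if PySem.Str.startswith s "(" then PySem.Str.slice s (some 1) (some (-1)) else s
  let r := s.toList.foldl (fun (st : List String × List Char × Int) c =>
      if c = ',' ∧ st.2.2 = 0 then (st.1 ++ [String.ofList st.2.1], [], st.2.2)
      else
        let d := if c = '(' then st.2.2 + 1 else if c = ')' then st.2.2 - 1 else st.2.2
        (st.1, st.2.1 ++ [c], d)) ([], [], 0)
  if r.1 = [] then [] else r.1 ++ [String.ofList r.2.1]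

-- ===== PRECONDITION & SPEC =====
def Spec_split_newick (newick : String) (out : List String) : Prop := out = split_newick_alt newick
instance (newick : String) (out : List String) : Decidable (Spec_split_newick newick out) := by unfold Spec_split_newick; infer_instance

-- ===== CLAIM (what is proved, stated in full; the proofs are below) =====
def Claim_equal_split_newick : Prop := ∀ (newick : String), Dom_split_newick newick → Spec_split_newick newick (split_newick newick)

-- ===== LEMMAS AND PROOFS =====

def pvDepthStep (d : Int) (c : Char) : Int := if c = '(' then d + 1 else if c = ')' then d - 1 else d

def pvTopIdx : List Char → Int → List Nat
  | [], _ => []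
  | c :: cs, d =>
    if c = '(' then (pvTopIdx cs (d+1)).map (· + 1)
    else if c = ')' then (pvTopIdx cs (d-1)).map (· + 1)
    else if c = ',' ∧ d = 0 then 0 :: (pvTopIdx cs d).map (· + 1)
    else (pvTopIdx cs d).map (· + 1)

lemma pvMapShift (l : List Nat) (pos : Int) :
    (l.map (· + 1)).map (fun (i : Nat) => pos + (i:Int)) = l.map (fun (i : Nat) => (pos+1) + (i:Int)) := by
  induction l with
  | nil => rfl
  | cons i l ih =>
    simp only [List.map_cons]
    rw [ih]
    congr 1
    push_cast
    ring

lemma pvFoldA_spec (cs : List Char) (acc : List Int) (d pos : Int) :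
    cs.foldl (fun (st : List Int × Int × Int) c =>
      if c = '(' then (st.1, st.2.1 + 1, st.2.2 + 1)
      else if c = ')' then (st.1, st.2.1 - 1, st.2.2 + 1)
      else if c = ',' then
        (if st.2.1 = 0 then (st.1 ++ [st.2.2], st.2.1, st.2.2 + 1) else (st.1, st.2.1, st.2.2 + 1))
      else (st.1, st.2.1, st.2.2 + 1)) (acc, d, pos)
    = (acc ++ (pvTopIdx cs d).map (fun (i : Nat) => pos + (i:Int)), cs.foldl pvDepthStep d, pos + cs.length) := by
  induction cs generalizing acc d pos with
  | nil => simp [pvTopIdx]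
  | cons c cs ih =>
    rw [List.foldl_cons]
    dsimp only
    by_cases h1 : c = '('
    · subst h1
      rw [if_pos rfl, ih, pvTopIdx, if_pos rfl, pvMapShift]
      refine Prod.ext rfl (Prod.ext ?_ ?_)
      · show List.foldl pvDepthStep (d+1) cs = List.foldl pvDepthStep d ('(' :: cs)
        rw [List.foldl_cons]; simp [pvDepthStep]
      · show pos + 1 + (cs.length : Int) = pos + ((('(' :: cs).length : Nat) : Int)
        simp only [List.length_cons]; push_cast; ring
    · by_cases h2 : c = ')'
      · subst h2
        rw [if_neg h1, if_pos rfl, ih, pvTopIdx, if_neg h1, if_pos rfl, pvMapShift]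
        refine Prod.ext rfl (Prod.ext ?_ ?_)
        · show List.foldl pvDepthStep (d-1) cs = List.foldl pvDepthStep d (')' :: cs)
          rw [List.foldl_cons]; simp [pvDepthStep, h1]
        · show pos + 1 + (cs.length : Int) = pos + (((')' :: cs).length : Nat) : Int)
          simp only [List.length_cons]; push_cast; ring
      · by_cases h3 : c = ','
        · subst h3
          rw [if_neg h1, if_neg h2, if_pos rfl]
          by_cases hd : d = 0
          · subst hd
            rw [if_pos rfl, ih, pvTopIdx, if_neg h1, if_neg h2, if_pos ⟨rfl, rfl⟩, List.map_cons, pvMapShift]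
            refine Prod.ext ?_ (Prod.ext ?_ ?_)
            · simp
            · show List.foldl pvDepthStep 0 cs = List.foldl pvDepthStep 0 (',' :: cs)
              rw [List.foldl_cons]; simp [pvDepthStep, h1, h2]
            · show pos + 1 + (cs.length : Int) = pos + (((',' :: cs).length : Nat) : Int)
              simp only [List.length_cons]; push_cast; ring
          · rw [if_neg hd, ih, pvTopIdx, if_neg h1, if_neg h2, if_neg (by simp [hd]), pvMapShift]
            refine Prod.ext rfl (Prod.ext ?_ ?_)
            · show List.foldl pvDepthStep d cs = List.foldl pvDepthStep d (',' :: cs)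
              rw [List.foldl_cons]; simp [pvDepthStep, h1, h2]
            · show pos + 1 + (cs.length : Int) = pos + (((',' :: cs).length : Nat) : Int)
              simp only [List.length_cons]; push_cast; ring
        · rw [if_neg h1, if_neg h2, if_neg h3, ih, pvTopIdx, if_neg h1, if_neg h2,
              if_neg (by simp [h3]), pvMapShift]
          refine Prod.ext rfl (Prod.ext ?_ ?_)
          · show List.foldl pvDepthStep d cs = List.foldl pvDepthStep d (c :: cs)
            rw [List.foldl_cons]; simp [pvDepthStep, h1, h2]
          · show pos + 1 + (cs.length : Int) = pos + (((c :: cs).length : Nat) : Int)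
            simp only [List.length_cons]; push_cast; ring

def pvSplitTop : List Char → Int → List (List Char) × List Char
  | [], _ => ([], [])
  | c :: cs, d =>
    if c = ',' ∧ d = 0 then
      ([] :: (pvSplitTop cs d).1, (pvSplitTop cs d).2)
    else
      match pvSplitTop cs (pvDepthStep d c) with
      | ([], t) => ([], c :: t)
      | (p :: ps, t) => ((c :: p) :: ps, t)

lemma pvFoldB_spec (cs : List Char) (parts : List String) (buf : List Char) (d : Int) :
    cs.foldl (fun (st : List String × List Char × Int) c =>
      if c = ',' ∧ st.2.2 = 0 then (st.1 ++ [String.ofList st.2.1], [], st.2.2)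
      else
        let dd := if c = '(' then st.2.2 + 1 else if c = ')' then st.2.2 - 1 else st.2.2
        (st.1, st.2.1 ++ [c], dd)) (parts, buf, d)
    = (match (pvSplitTop cs d).1 with
       | [] => (parts, buf ++ (pvSplitTop cs d).2, cs.foldl pvDepthStep d)
       | p :: ps => (parts ++ String.ofList (buf ++ p) :: ps.map String.ofList,
                     (pvSplitTop cs d).2, cs.foldl pvDepthStep d)) := by
  induction cs generalizing parts buf d with
  | nil => simp [pvSplitTop]
  | cons c cs ih =>
    rw [List.foldl_cons]
    dsimp only
    by_cases hc : c = ',' ∧ d = 0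
    · rw [if_pos hc, ih]
      obtain ⟨hc1, hc2⟩ := hc; subst hc1; subst hc2
      rw [pvSplitTop]
      rw [if_pos ⟨rfl, rfl⟩]
      rcases hps : (pvSplitTop cs 0).1 with _ | ⟨p, ps⟩
      · simp [pvDepthStep, List.foldl_cons]
      · simp [pvDepthStep, List.foldl_cons]
    · rw [if_neg hc, ih]
      have hstep : (if c = '(' then d + 1 else if c = ')' then d - 1 else d) = pvDepthStep d c := rfl
      rw [hstep]
      rw [pvSplitTop, if_neg hc]
      rcases hps : (pvSplitTop cs (pvDepthStep d c)).1 with _ | ⟨p, ps⟩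
      · have h2 : pvSplitTop cs (pvDepthStep d c) = ([], (pvSplitTop cs (pvDepthStep d c)).2) := by
          rw [← hps]
        rw [h2]
        simp [List.foldl_cons, pvDepthStep]
      · have h2 : pvSplitTop cs (pvDepthStep d c) = (p :: ps, (pvSplitTop cs (pvDepthStep d c)).2) := by
          rw [← hps]
        rw [h2]
        simp [List.foldl_cons]

def pvSliceAll : List Char → Nat → List Nat → List (List Char)
  | cs, b, [] => [cs.drop b]
  | cs, b, i :: is => (cs.drop b).take (i - b) :: pvSliceAll cs (i+1) is

lemma pvSliceAll_length (cs : List Char) (b : Nat) (l : List Nat) :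
    (pvSliceAll cs b l).length = l.length + 1 := by
  induction l generalizing b with
  | nil => rfl
  | cons i is ih => simp [pvSliceAll, ih]

lemma pvSliceAll_shift (l : List Nat) (c : Char) (cs : List Char) (b : Nat) :
    pvSliceAll (c :: cs) (b+1) (l.map (· + 1)) = pvSliceAll cs b l := by
  induction l generalizing b with
  | nil => simp [pvSliceAll]
  | cons i is ih =>
    simp only [List.map_cons, pvSliceAll, List.drop_succ_cons]
    rw [ih]
    have h : i + 1 - (b + 1) = i - b := by omega
    rw [h]

lemma pvChunks_eq (cs : List Char) (d : Int) :
    pvSliceAll cs 0 (pvTopIdx cs d) = (pvSplitTop cs d).1 ++ [(pvSplitTop cs d).2] := by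
  induction cs generalizing d with
  | nil => simp [pvTopIdx, pvSplitTop, pvSliceAll]
  | cons c cs ih =>
    by_cases hc : c = ',' ∧ d = 0
    · obtain ⟨hc1, hc2⟩ := hc; subst hc1; subst hc2
      rw [pvTopIdx, if_neg (by decide), if_neg (by decide), if_pos ⟨rfl, rfl⟩]
      rw [pvSplitTop, if_pos ⟨rfl, rfl⟩]
      show pvSliceAll (',' :: cs) 0 (0 :: (pvTopIdx cs 0).map (· + 1)) = _
      rw [pvSliceAll]
      have h01 : (0:Nat) + 1 = 0 + 1 := rfl
      rw [show (0:Nat) + 1 = 0 + 1 from rfl, pvSliceAll_shift, ih]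
      simp
    · have htop : pvTopIdx (c :: cs) d = (pvTopIdx cs (pvDepthStep d c)).map (· + 1) := by
        rw [pvTopIdx, pvDepthStep]
        by_cases h1 : c = '('
        · rw [if_pos h1, if_pos h1]
        · rw [if_neg h1, if_neg h1]
          by_cases h2 : c = ')'
          · rw [if_pos h2, if_pos h2]
          · rw [if_neg h2, if_neg h2, if_neg hc]
      rw [htop, pvSplitTop, if_neg hc]
      rcases hps : (pvSplitTop cs (pvDepthStep d c)).1 with _ | ⟨p, ps⟩
      · have h2 : pvSplitTop cs (pvDepthStep d c) = ([], (pvSplitTop cs (pvDepthStep d c)).2) := by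
          rw [← hps]
        have hlen : (pvTopIdx cs (pvDepthStep d c)).length = 0 := by
          have := pvSliceAll_length cs 0 (pvTopIdx cs (pvDepthStep d c))
          rw [ih, hps] at this
          simpa using this
        have hnil : pvTopIdx cs (pvDepthStep d c) = [] := List.length_eq_zero_iff.mp hlen
        have hcs : (pvSplitTop cs (pvDepthStep d c)).2 = cs := by
          have := ih (pvDepthStep d c)
          rw [hnil, hps] at this
          simpa [pvSliceAll] using this.symm
        rw [h2, hnil]
        simp [pvSliceAll, hcs]
      · have h2 : pvSplitTop cs (pvDepthStep d c) = (p :: ps, (pvSplitTop cs (pvDepthStep d c)).2) := by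
          rw [← hps]
        have hih := ih (pvDepthStep d c)
        rw [hps] at hih
        rcases hl : pvTopIdx cs (pvDepthStep d c) with _ | ⟨i, is⟩
        · rw [hl] at hih
          simp [pvSliceAll] at hih
        · rw [hl] at hih
          rw [pvSliceAll] at hih
          simp only [List.drop_zero, Nat.sub_zero] at hih
          have hp : cs.take i = p := by
            have := congrArg (fun l => l.headI) hih
            simpa using this
          have hrest : pvSliceAll cs (i+1) is = ps ++ [(pvSplitTop cs (pvDepthStep d c)).2] := by
            have := congrArg List.tail hih
            simpa using this
          rw [h2]
          show pvSliceAll (c :: cs) 0 ((i :: is).map (· + 1)) = ((c :: p) :: ps) ++ [(pvSplitTop cs (pvDepthStep d c)).2]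
          rw [List.map_cons, pvSliceAll]
          simp only [List.drop_zero, Nat.sub_zero, List.take_succ_cons]
          rw [show i + 1 + 1 = (i + 1) + 1 from rfl, pvSliceAll_shift, hrest, hp]
          simp

lemma pvSliceFrom (s : String) (b : Nat) :
    PySem.Str.slice s (some (b:Int)) none = String.ofList (s.toList.drop b) := by
  simp [PySem.Str.slice, PySem.List.slice_from_natCast]

lemma pvSliceBetween (s : String) (b i : Nat) :
    PySem.Str.slice s (some (b:Int)) (some (i:Int)) = String.ofList ((s.toList.drop b).take (i - b)) := by
  simp [PySem.Str.slice, PySem.List.slice_natCast]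

lemma pvPhase2 (l : List Nat) (s : String) (acc : List String) (b : Int) (bn : Nat)
    (hb : b = (bn:Int)) :
    (let r := (l.map (fun (i : Nat) => (0:Int) + (i:Int))).foldl (fun (st : List String × Int) c =>
        (st.1 ++ [PySem.Str.slice s (some st.2) (some c)], c + 1)) (acc, b)
     r.1 ++ [PySem.Str.slice s (some r.2) none]) = acc ++ (pvSliceAll s.toList bn l).map String.ofList := by
  induction l generalizing acc b bn with
  | nil =>
    subst hb
    simp only [List.map_nil, List.foldl_nil]
    rw [pvSliceFrom]
    simp [pvSliceAll]
  | cons i is ih =>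
    subst hb
    simp only [List.map_cons, List.foldl_cons]
    have hz : (0:Int) + (i:Int) = (i:Int) := by ring
    rw [hz]
    have hnext : (i:Int) + 1 = ((i+1 : Nat) : Int) := by push_cast; ring
    rw [hnext, ih _ _ (i+1) rfl]
    rw [pvSliceBetween]
    simp [pvSliceAll, List.append_assoc]

lemma pvLenEq (cs : List Char) (d : Int) :
    (pvTopIdx cs d).length = (pvSplitTop cs d).1.length := by
  have h := congrArg List.length (pvChunks_eq cs d)
  simp only [pvSliceAll_length, List.length_append, List.length_cons, List.length_nil] at h
  omega
-- by one pass that buffers the current chunk and flushes it at each top-level comma (simpler).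


-- ===== VERDICT (by name: the statement is the Claim_ definition above) =====
theorem split_newick_spec : Claim_equal_split_newick := by
  intro newick _
  unfold Spec_split_newick
  show split_newick newick = split_newick_alt newick
  simp only [split_newick, split_newick_alt]
  set t := (if PySem.Str.startswith (PySem.Str.stripChars newick " ;") "("
      then PySem.Str.slice (PySem.Str.stripChars newick " ;") (some 1) (some (-1))
      else PySem.Str.stripChars newick " ;") with ht
  clear_value t
  clear ht
  rw [pvFoldA_spec t.toList [] 0 0, pvFoldB_spec t.toList [] [] 0]
  rcases hps : (pvSplitTop t.toList 0).1 with _ | ⟨p, ps⟩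
  · have hl : pvTopIdx t.toList 0 = [] := by
      have := pvLenEq t.toList 0
      rw [hps] at this
      exact List.length_eq_zero_iff.mp (by simpa using this)
    rw [hl]
    simp only [List.map_nil, List.nil_append]
    rw [if_neg (by simp)]
    rfl
  · have hlen : (pvTopIdx t.toList 0).length = ps.length + 1 := by
      rw [pvLenEq, hps]; simp
    obtain ⟨i, is, hl⟩ : ∃ i is, pvTopIdx t.toList 0 = i :: is := by
      cases h : pvTopIdx t.toList 0 with
      | nil => rw [h] at hlen; simp at hlen
      | cons a b => exact ⟨a, b, rfl⟩
    rw [hl]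
    have h2 := pvPhase2 (i :: is) t [] 0 0 (by norm_num)
    simp only [] at h2
    simp only [List.nil_append, List.map_cons]
    rw [if_pos (by simp), if_neg (by simp)]
    rw [List.map_cons] at h2
    rw [h2, ← List.map_cons, ← hl, pvChunks_eq, hps]
    have ht2 : pvSliceAll t.toList 0 (pvTopIdx t.toList 0) = (p :: ps) ++ [(pvSplitTop t.toList 0).2] := by
      rw [pvChunks_eq, hps]
    simp
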